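-- pv_equiv track=rewrite | github.com/bio-ontology-research-group/hapli | hapli/diploid_analyzer.py | _determine_worst_consequence
-- ===== SOURCE A (Python) =====
-- from typing import Dict, List, Optional, Set, Tuple, Any, Union
--
-- def _determine_worst_consequence(consequences: List[str]) -> str:
--     """Determine the worst (most severe) consequence."""
--     if not consequences:
--         return 'MISSING'
--
--     # Severity order for consequences
--     lof_consequences = ['MISSING', 'FRAMESHIFT', 'START_LOST', 'STOP_LOST', 'NONSENSE', 'LOST']
--     moderate_consequences = ['TRUNCATED', 'INFRAME_INDEL', 'PARTIAL', 'CORE_DISRUPTED']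
--
--     # Check for LOF consequences first
--     for cons in lof_consequences:
--         if cons in consequences:
--             return cons
--
--     # Then moderate consequences
--     for cons in moderate_consequences:
--         if cons in consequences:
--             return cons
--
--     return consequences[0]  # Fallback
-- ===== SOURCE B (Python) =====
-- # B: single indexed pass with a rank table instead of category-by-category scans.
-- _SEVERITY = ['MISSING', 'FRAMESHIFT', 'START_LOST', 'STOP_LOST', 'NONSENSE', 'LOST',
--              'TRUNCATED', 'INFRAME_INDEL', 'PARTIAL', 'CORE_DISRUPTED']
-- _RANK = {name: i for i, name in enumerate(_SEVERITY)}
--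
-- def _determine_worst_consequence(consequences):
--     """Determine the worst (most severe) consequence."""
--     if not consequences:
--         return 'MISSING'
--     best = None
--     best_rank = len(_SEVERITY)
--     for c in consequences:
--         r = _RANK.get(c)
--         if r is not None and r < best_rank:
--             best, best_rank = c, r
--     return best if best is not None else consequences[0]
-- ===== Notes on version B (the rewrite author's own statement) =====
-- stated objective: simpler
-- what changed: Replaces ten category-by-category membership scans of the input with a single pass over the input that keeps the consequence of smallest rank in a precomputed severity-rank dict.
import Mathlib
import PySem

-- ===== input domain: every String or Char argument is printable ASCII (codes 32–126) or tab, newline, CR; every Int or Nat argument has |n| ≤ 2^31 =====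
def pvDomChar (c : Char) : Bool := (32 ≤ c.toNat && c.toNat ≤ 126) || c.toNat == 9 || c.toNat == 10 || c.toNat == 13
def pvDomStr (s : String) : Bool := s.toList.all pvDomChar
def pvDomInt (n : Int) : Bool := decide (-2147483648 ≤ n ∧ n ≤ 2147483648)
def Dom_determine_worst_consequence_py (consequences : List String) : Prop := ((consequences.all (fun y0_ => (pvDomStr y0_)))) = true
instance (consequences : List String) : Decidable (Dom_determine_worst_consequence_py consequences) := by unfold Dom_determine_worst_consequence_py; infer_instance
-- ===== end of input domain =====

-- B replaces A's ten category-by-category membership scans with one indexed pass over the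
-- input keeping the smallest-rank consequence (objective: simpler; same return value).

-- ===== PORT A =====
def pvLof : List String := ["MISSING", "FRAMESHIFT", "START_LOST", "STOP_LOST", "NONSENSE", "LOST"]
def pvMod : List String := ["TRUNCATED", "INFRAME_INDEL", "PARTIAL", "CORE_DISRUPTED"]

-- the 'for cons in …: if cons in consequences: return cons' loop
def pvFirstIn (cands consequences : List String) : Option String :=
  match cands with
  | [] => none
  | c :: rest => if consequences.contains c then some c else pvFirstIn rest consequences

def determine_worst_consequence_py (consequences : List String) : String :=
  if consequences.isEmpty then "MISSING"
  else
    match pvFirstIn pvLof consequences with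
    | some c => c
    | none =>
      match pvFirstIn pvMod consequences with
      | some c => c
      | none => consequences.headD ""   -- consequences[0]; list is nonempty here

-- ===== PORT B =====
def pvSeverity : List String :=
  ["MISSING", "FRAMESHIFT", "START_LOST", "STOP_LOST", "NONSENSE", "LOST",
   "TRUNCATED", "INFRAME_INDEL", "PARTIAL", "CORE_DISRUPTED"]

-- _RANK = {name: i for i, name in enumerate(_SEVERITY)}
def pvRank : PySem.Dict String Nat :=
  PySem.Dict.ofList pvSeverity.zipIdx

def determine_worst_consequence_py_alt (consequences : List String) : String :=
  if consequences.isEmpty then "MISSING"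
  else
    let st := consequences.foldl
      (fun (acc : Option String × Nat) c =>
        match pvRank.get? c with
        | some r => if r < acc.2 then (some c, r) else acc
        | none => acc)
      (none, pvSeverity.length)
    match st.1 with
    | some b => b
    | none => consequences.headD ""

-- ===== PRECONDITION & SPEC =====
def Spec_determine_worst_consequence_py (consequences : List String) (out : String) : Prop := out = determine_worst_consequence_py_alt consequences
instance (consequences : List String) (out : String) : Decidable (Spec_determine_worst_consequence_py consequences out) := by unfold Spec_determine_worst_consequence_py; infer_instance

-- ===== CLAIM (what is proved, stated in full; the proofs are below) =====
def Claim_equal_determine_worst_consequence_py : Prop := ∀ (consequences : List String), Dom_determine_worst_consequence_py consequences → Spec_determine_worst_consequence_py consequences (determine_worst_consequence_py consequences)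

-- ===== LEMMAS AND PROOFS =====

-- rank of a string: table index, 10 when absent
def pvRk (c : String) : Nat := (pvRank.get? c).getD 10

def pvStrOf (m : Nat) : String := pvSeverity.getD m ""

-- running minimum of ranks, seeded with r
def pvMinR (cs : List String) (r : Nat) : Nat :=
  cs.foldl (fun a c => if pvRk c < a then pvRk c else a) r

lemma pvRank_items : pvRank = PySem.Dict.mk
    [("MISSING", 0), ("FRAMESHIFT", 1), ("START_LOST", 2), ("STOP_LOST", 3), ("NONSENSE", 4),
     ("LOST", 5), ("TRUNCATED", 6), ("INFRAME_INDEL", 7), ("PARTIAL", 8), ("CORE_DISRUPTED", 9)] := by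
  decide

lemma pvRank_char : ∀ c m, pvRank.get? c = some m → m < 10 ∧ c = pvStrOf m := by
  intro c m h
  rw [pvRank_items] at h
  simp only [PySem.Dict.get?, List.find?] at h
  repeat' split at h
  all_goals first
    | (rename_i hb
       have hc := eq_of_beq hb
       rw [Option.map_some] at h
       injection h with h2
       subst h2
       subst hc
       exact ⟨by decide, by decide⟩)
    | simp at h

lemma pvRk_strOf : ∀ k, k < 10 → pvRk (pvStrOf k) = k := by decide

lemma pvMinR_le (cs : List String) : ∀ r, pvMinR cs r ≤ r := by
  induction cs with
  | nil => intro r; simp [pvMinR]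
  | cons c cs ih =>
    intro r
    simp only [pvMinR, List.foldl] at *
    split_ifs with h
    · exact le_trans (ih _) (le_of_lt h)
    · exact ih r

lemma pvMinR_le_of_mem (cs : List String) : ∀ r c, c ∈ cs → pvMinR cs r ≤ pvRk c := by
  induction cs with
  | nil => intro r c h; cases h
  | cons x cs ih =>
    intro r c h
    simp only [pvMinR, List.foldl]
    rcases List.mem_cons.mp h with h | h
    · subst h
      split_ifs with hx
      · exact pvMinR_le cs _
      · exact le_trans (pvMinR_le cs r) (le_of_not_gt hx)
    · split_ifs with hx <;> exact ih _ c h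

lemma pvMinR_exists (cs : List String) : ∀ r, pvMinR cs r < r → ∃ c ∈ cs, pvRk c = pvMinR cs r := by
  induction cs with
  | nil => intro r h; simp [pvMinR] at h
  | cons x cs ih =>
    intro r h
    simp only [pvMinR, List.foldl] at h ⊢
    split_ifs at h ⊢ with hx
    · by_cases hlt : pvMinR cs (pvRk x) < pvRk x
      · obtain ⟨c, hc, hrk⟩ := ih _ hlt
        exact ⟨c, List.mem_cons_of_mem _ hc, hrk⟩
      · have : pvMinR cs (pvRk x) = pvRk x :=
          le_antisymm (pvMinR_le cs _) (le_of_not_gt hlt)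
        exact ⟨x, List.mem_cons_self, this.symm⟩
    · obtain ⟨c, hc, hrk⟩ := ih _ h
      exact ⟨c, List.mem_cons_of_mem _ hc, hrk⟩

-- the step function of B's fold
def pvStep (acc : Option String × Nat) (c : String) : Option String × Nat :=
  match pvRank.get? c with
  | some r => if r < acc.2 then (some c, r) else acc
  | none => acc

lemma pvStep_eq (acc : Option String × Nat) (c : String) (h10 : acc.2 ≤ 10) :
    pvStep acc c = if pvRk c < acc.2 then (some (pvStrOf (pvRk c)), pvRk c) else acc := by
  unfold pvStep pvRk
  cases h : pvRank.get? c with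
  | none =>
    simp only [Option.getD]
    split_ifs with hlt
    · omega
    · rfl
  | some m =>
    obtain ⟨hm, hc⟩ := pvRank_char c m h
    simp [Option.getD, ← hc]

lemma pvFold_inv (cs : List String) : ∀ (b : Option String) (r : Nat), r ≤ 10 →
    cs.foldl pvStep (b, r)
      = ((if pvMinR cs r < r then some (pvStrOf (pvMinR cs r)) else b), pvMinR cs r) := by
  induction cs with
  | nil => intro b r _; simp [pvMinR]
  | cons c cs ih =>
    intro b r hr
    rw [List.foldl_cons, pvStep_eq (b, r) c hr]
    have hmins : pvMinR (c :: cs) r = pvMinR cs (if pvRk c < r then pvRk c else r) := by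
      simp [pvMinR, List.foldl]
    by_cases hc : pvRk c < r
    · have hle : pvRk c ≤ 10 := by omega
      rw [if_pos hc, ih (some (pvStrOf (pvRk c))) (pvRk c) hle, hmins, if_pos hc]
      have hle2 : pvMinR cs (pvRk c) ≤ pvRk c := pvMinR_le cs _
      have hlt2 : pvMinR cs (pvRk c) < r := by omega
      rw [if_pos hlt2]
      by_cases h2 : pvMinR cs (pvRk c) < pvRk c
      · rw [if_pos h2]
      · rw [if_neg h2]
        have : pvMinR cs (pvRk c) = pvRk c := by omega
        rw [this]
    · rw [if_neg hc, ih b r hr, hmins, if_neg hc]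

lemma pvFirstIn_append (xs ys cs : List String) :
    pvFirstIn (xs ++ ys) cs
      = match pvFirstIn xs cs with
        | some c => some c
        | none => pvFirstIn ys cs := by
  induction xs with
  | nil => simp [pvFirstIn]
  | cons x xs ih =>
    simp only [List.cons_append, pvFirstIn]
    split_ifs with h <;> simp [ih]

lemma pvFirstIn_none (cands cs : List String)
    (h : ∀ c ∈ cands, cs.contains c = false) : pvFirstIn cands cs = none := by
  induction cands with
  | nil => rfl
  | cons x xs ih =>
    simp only [pvFirstIn]
    rw [h x List.mem_cons_self]
    simp only [Bool.false_eq_true, if_false]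
    exact ih (fun c hc => h c (List.mem_cons_of_mem _ hc))

lemma pvFirstIn_getD (cs : List String) : ∀ (cands : List String) (m : Nat), m < cands.length →
    cs.contains (cands.getD m "") = true →
    (∀ k, k < m → cs.contains (cands.getD k "") = false) →
    pvFirstIn cands cs = some (cands.getD m "") := by
  intro cands
  induction cands with
  | nil => intro m hm; simp at hm
  | cons x xs ih =>
    intro m hm hmem hlt
    cases m with
    | zero =>
      simp only [List.getD_cons_zero] at hmem ⊢
      unfold pvFirstIn
      rw [hmem]
      simp
    | succ m' =>
      have hx : cs.contains x = false := by
        have := hlt 0 (Nat.succ_pos m')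
        simpa using this
      simp only [List.getD_cons_succ] at hmem ⊢
      simp only [pvFirstIn, hx, Bool.false_eq_true, if_false]
      exact ih m' (by simpa using hm) hmem
        (fun k hk => by simpa using hlt (k + 1) (by omega))

-- ===== VERDICT (by name: the statement is the Claim_ definition above) =====
theorem determine_worst_consequence_py_spec : Claim_equal_determine_worst_consequence_py := by
  intro cs _
  unfold Spec_determine_worst_consequence_py determine_worst_consequence_py
    determine_worst_consequence_py_alt
  by_cases hempty : cs.isEmpty
  · simp [hempty]
  · simp only [hempty, Bool.false_eq_true, if_false]
    have hsev : pvLof ++ pvMod = pvSeverity := by decide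
    have hA : (match pvFirstIn pvLof cs with
        | some c => c
        | none =>
          match pvFirstIn pvMod cs with
          | some c => c
          | none => cs.headD "")
        = (match pvFirstIn pvSeverity cs with
          | some c => c
          | none => cs.headD "") := by
      rw [← hsev, pvFirstIn_append]
      cases pvFirstIn pvLof cs <;> simp
    rw [hA]
    have hstep : (fun (acc : Option String × Nat) c =>
        match pvRank.get? c with
        | some r => if r < acc.2 then (some c, r) else acc
        | none => acc) = pvStep := by
      funext acc c; rfl
    have hlen : pvSeverity.length = 10 := by decide
    simp only [hstep, hlen]
    rw [pvFold_inv cs none 10 (le_refl 10)]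
    by_cases hlt : pvMinR cs 10 < 10
    · -- some severity name occurs in cs: both sides return pvStrOf (pvMinR cs 10)
      obtain ⟨c, hc, hrk⟩ := pvMinR_exists cs 10 hlt
      have hcm : c = pvStrOf (pvMinR cs 10) := by
        unfold pvRk at hrk
        cases h : pvRank.get? c with
        | none => rw [h] at hrk; simp [Option.getD] at hrk; omega
        | some k =>
          obtain ⟨hk, hck⟩ := pvRank_char c k h
          rw [h] at hrk; simp only [Option.getD] at hrk
          rw [hck, hrk]
      have hmem : cs.contains (pvStrOf (pvMinR cs 10)) = true := by
        rw [← hcm]; exact List.contains_iff_mem.mpr hc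
      have hltk : ∀ k, k < pvMinR cs 10 → cs.contains (pvStrOf k) = false := by
        intro k hk
        by_contra hcon
        have hkmem : pvStrOf k ∈ cs :=
          List.contains_iff_mem.mp (Bool.of_not_eq_false hcon)
        have := pvMinR_le_of_mem cs 10 _ hkmem
        rw [pvRk_strOf k (by omega)] at this
        omega
      have hfind : pvFirstIn pvSeverity cs = some (pvStrOf (pvMinR cs 10)) :=
        pvFirstIn_getD cs pvSeverity (pvMinR cs 10) (by rw [hlen]; exact hlt) hmem hltk
      rw [hfind]
      simp [hlt]
    · -- no severity name occurs: both fall back to consequences[0]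
      have hnone : pvFirstIn pvSeverity cs = none := by
        apply pvFirstIn_none
        intro p hp
        by_contra hcon
        have hpmem : p ∈ cs := List.contains_iff_mem.mp (Bool.of_not_eq_false hcon)
        have h1 := pvMinR_le_of_mem cs 10 p hpmem
        have h2 : pvRk p ≤ 9 := by fin_cases hp <;> decide
        omega
      rw [hnone]
      simp [hlt]
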